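-- pv_equiv track=rewrite | github.com/quintus0505/wigglyeyes | analysis/string_tools.py | count_component
-- ===== SOURCE A (Python) =====
-- def count_component(error_list):
--     INF, IF, C, F = 0, 0, 0, 0
--     slips_info = {'uncorrected': {'INS': 0, 'OMI': 0, 'SUB': 0, 'CAP': 0, 'TRA': 0},
--                   'corrected': {'INS': 0, 'OMI': 0, 'SUB': 0, 'CAP': 0, 'TRA': 0}}
--     for error in error_list:
--         if error[0] == 0:
--             if error[1] == "i":
--                 INF += 1
--                 slips_info['uncorrected']['INS'] += 1
--             elif error[1] == "o":
--                 INF += 1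
--                 slips_info['uncorrected']['OMI'] += 1
--             elif error[1] == "s":
--                 INF += 1
--                 slips_info['uncorrected']['SUB'] += 1
--             elif error[1] == "c":
--                 INF += 1
--                 slips_info['uncorrected']['CAP'] += 1
--             elif error[1] == "t":
--                 INF += 1
--                 slips_info['uncorrected']['TRA'] += 1
--             else:
--                 C += 1
--         else:
--             if error[1] == "i":
--                 IF += 1
--                 slips_info['corrected']['INS'] += 1
--             elif error[1] == "o":
--                 IF += 1
--                 slips_info['corrected']['OMI'] += 1
--             elif error[1] == "s":
--                 IF += 1
--                 slips_info['corrected']['SUB'] += 1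
--             elif error[1] == "c":
--                 IF += 1
--                 slips_info['corrected']['CAP'] += 1
--             elif error[1] == "t":
--                 IF += 1
--                 slips_info['corrected']['TRA'] += 1
--             else:
--                 # C += 1
--                 pass
--     return INF, IF, C, F, slips_info
-- ===== SOURCE B (Python) =====
-- KINDS = [('i', 'INS'), ('o', 'OMI'), ('s', 'SUB'), ('c', 'CAP'), ('t', 'TRA')]
--
-- def count_component(error_list):
--     # per-cell counting: each slips_info cell is an independent count over the list;
--     # the totals INF/IF are derived from the table afterwards
--     def tally(uncorrected, letter):
--         return sum(1 for e in error_list if (e[0] == 0) == uncorrected and e[1] == letter)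
--     uncorr = {name: tally(True, k) for k, name in KINDS}
--     corr = {name: tally(False, k) for k, name in KINDS}
--     known = [k for k, _ in KINDS]
--     C = sum(1 for e in error_list if e[0] == 0 and e[1] not in known)
--     slips_info = {'uncorrected': uncorr, 'corrected': corr}
--     return sum(uncorr.values()), sum(corr.values()), C, 0, slips_info
-- ===== Notes on version B (the rewrite author's own statement) =====
-- stated objective: alternative
-- what changed: Instead of one loop threading 13 mutable counters through an if/elif chain, B computes each slips_info cell as an independent count over the list and derives the INF/IF totals from the table afterwards (C counted separately, F is constantly 0).
import Mathlib
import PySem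

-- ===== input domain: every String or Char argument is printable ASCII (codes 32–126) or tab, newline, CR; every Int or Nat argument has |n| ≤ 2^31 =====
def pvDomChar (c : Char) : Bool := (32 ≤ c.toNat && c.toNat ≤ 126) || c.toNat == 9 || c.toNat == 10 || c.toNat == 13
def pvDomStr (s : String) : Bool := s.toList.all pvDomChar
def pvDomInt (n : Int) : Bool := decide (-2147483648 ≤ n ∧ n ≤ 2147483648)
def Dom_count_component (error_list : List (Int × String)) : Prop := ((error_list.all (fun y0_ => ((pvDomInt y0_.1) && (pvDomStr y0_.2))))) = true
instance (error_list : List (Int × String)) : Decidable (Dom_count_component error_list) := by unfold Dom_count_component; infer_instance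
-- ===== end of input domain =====

-- B replaces A's single loop over 13 mutable counters by independent per-cell counts,
-- deriving the INF/IF totals from the table afterwards (objective: alternative decomposition).

-- ===== PORT A =====
-- slips_info[bucket][kind] += 1 (both keys always present, so Dict.modify's default is never used)
def ccBump (d : PySem.Dict String (PySem.Dict String Int)) (bucket kind : String) :
    PySem.Dict String (PySem.Dict String Int) :=
  d.modify bucket PySem.Dict.empty (fun inner => inner.modify kind 0 (· + 1))

def count_component_loop (errs : List (Int × String)) (INF IF C F : Int)
    (slips : PySem.Dict String (PySem.Dict String Int)) :
    Int × Int × Int × Int × (List (String × List (String × Int))) :=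
  match errs with
  | [] => (INF, IF, C, F, slips.items.map (fun p => (p.1, p.2.items)))
  | err :: rest =>
    if err.1 = 0 then
      if err.2 = "i" then count_component_loop rest (INF + 1) IF C F (ccBump slips "uncorrected" "INS")
      else if err.2 = "o" then count_component_loop rest (INF + 1) IF C F (ccBump slips "uncorrected" "OMI")
      else if err.2 = "s" then count_component_loop rest (INF + 1) IF C F (ccBump slips "uncorrected" "SUB")
      else if err.2 = "c" then count_component_loop rest (INF + 1) IF C F (ccBump slips "uncorrected" "CAP")
      else if err.2 = "t" then count_component_loop rest (INF + 1) IF C F (ccBump slips "uncorrected" "TRA")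
      else count_component_loop rest INF IF (C + 1) F slips
    else
      if err.2 = "i" then count_component_loop rest INF (IF + 1) C F (ccBump slips "corrected" "INS")
      else if err.2 = "o" then count_component_loop rest INF (IF + 1) C F (ccBump slips "corrected" "OMI")
      else if err.2 = "s" then count_component_loop rest INF (IF + 1) C F (ccBump slips "corrected" "SUB")
      else if err.2 = "c" then count_component_loop rest INF (IF + 1) C F (ccBump slips "corrected" "CAP")
      else if err.2 = "t" then count_component_loop rest INF (IF + 1) C F (ccBump slips "corrected" "TRA")
      else count_component_loop rest INF IF C F slips

def count_component (error_list : List (Int × String)) :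
    Int × Int × Int × Int × (List (String × List (String × Int))) :=
  count_component_loop error_list 0 0 0 0
    (PySem.Dict.ofList
      [("uncorrected", PySem.Dict.ofList [("INS", 0), ("OMI", 0), ("SUB", 0), ("CAP", 0), ("TRA", 0)]),
       ("corrected", PySem.Dict.ofList [("INS", 0), ("OMI", 0), ("SUB", 0), ("CAP", 0), ("TRA", 0)])])

-- ===== PORT B =====
def ccKinds : List (String × String) :=
  [("i", "INS"), ("o", "OMI"), ("s", "SUB"), ("c", "CAP"), ("t", "TRA")]

def ccTally (error_list : List (Int × String)) (uncorrected : Bool) (letter : String) : Int :=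
  ((error_list.countP (fun e => (decide (e.1 = 0) == uncorrected) && (e.2 == letter))) : Int)

def count_component_alt (error_list : List (Int × String)) :
    Int × Int × Int × Int × (List (String × List (String × Int))) :=
  let uncorr := ccKinds.map (fun p => (p.2, ccTally error_list true p.1))
  let corr := ccKinds.map (fun p => (p.2, ccTally error_list false p.1))
  let known := ccKinds.map (fun p => p.1)
  let C : Int := ((error_list.countP (fun e => decide (e.1 = 0) && !(known.contains e.2))) : Int)
  ((uncorr.map Prod.snd).sum, (corr.map Prod.snd).sum, C, 0,
   [("uncorrected", uncorr), ("corrected", corr)])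

-- ===== PRECONDITION & SPEC =====
def Spec_count_component (error_list : List (Int × String)) (out : Int × Int × Int × Int × (List (String × List (String × Int)))) : Prop := out = count_component_alt error_list
instance (error_list : List (Int × String)) (out : Int × Int × Int × Int × (List (String × List (String × Int)))) : Decidable (Spec_count_component error_list out) := by
  unfold Spec_count_component
  have h0 : DecidableEq (List (String × List (String × Int))) := fun x y => inferInstance
  have h1 : DecidableEq (Int × List (String × List (String × Int))) := @instDecidableEqProd _ _ _ h0
  have h2 : DecidableEq (Int × Int × List (String × List (String × Int))) := @instDecidableEqProd _ _ _ h1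
  have h3 : DecidableEq (Int × Int × Int × List (String × List (String × Int))) := @instDecidableEqProd _ _ _ h2
  exact @instDecidableEqProd _ _ _ h3 out (count_component_alt error_list)

-- ===== CLAIM (what is proved, stated in full; the proofs are below) =====
def Claim_equal_count_component : Prop := ∀ (error_list : List (Int × String)), Dom_count_component error_list → Spec_count_component error_list (count_component error_list)

-- ===== LEMMAS AND PROOFS =====
-- canonical shape of the slips dict during A's loop, parametrised by the ten cell values
def ccDict (a b c d e f g h i j : Int) : PySem.Dict String (PySem.Dict String Int) :=
  PySem.Dict.mk
    [("uncorrected", PySem.Dict.mk [("INS", a), ("OMI", b), ("SUB", c), ("CAP", d), ("TRA", e)]),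
     ("corrected", PySem.Dict.mk [("INS", f), ("OMI", g), ("SUB", h), ("CAP", i), ("TRA", j)])]

-- the unknown-letter count that feeds C
def ccUnk (error_list : List (Int × String)) : Int :=
  ((error_list.countP (fun e => decide (e.1 = 0) && !((["i", "o", "s", "c", "t"] : List String).contains e.2))) : Int)

theorem ccBump_u0 (a b c d e f g h i j : Int) :
    ccBump (ccDict a b c d e f g h i j) "uncorrected" "INS" = ccDict (a+1) b c d e f g h i j := by
  simp [ccBump, ccDict, PySem.Dict.modify, PySem.Dict.getD, PySem.Dict.get?, PySem.Dict.insert, PySem.Dict.contains]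

theorem ccBump_u1 (a b c d e f g h i j : Int) :
    ccBump (ccDict a b c d e f g h i j) "uncorrected" "OMI" = ccDict a (b+1) c d e f g h i j := by
  simp [ccBump, ccDict, PySem.Dict.modify, PySem.Dict.getD, PySem.Dict.get?, PySem.Dict.insert, PySem.Dict.contains]

theorem ccBump_u2 (a b c d e f g h i j : Int) :
    ccBump (ccDict a b c d e f g h i j) "uncorrected" "SUB" = ccDict a b (c+1) d e f g h i j := by
  simp [ccBump, ccDict, PySem.Dict.modify, PySem.Dict.getD, PySem.Dict.get?, PySem.Dict.insert, PySem.Dict.contains]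

theorem ccBump_u3 (a b c d e f g h i j : Int) :
    ccBump (ccDict a b c d e f g h i j) "uncorrected" "CAP" = ccDict a b c (d+1) e f g h i j := by
  simp [ccBump, ccDict, PySem.Dict.modify, PySem.Dict.getD, PySem.Dict.get?, PySem.Dict.insert, PySem.Dict.contains]

theorem ccBump_u4 (a b c d e f g h i j : Int) :
    ccBump (ccDict a b c d e f g h i j) "uncorrected" "TRA" = ccDict a b c d (e+1) f g h i j := by
  simp [ccBump, ccDict, PySem.Dict.modify, PySem.Dict.getD, PySem.Dict.get?, PySem.Dict.insert, PySem.Dict.contains]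

theorem ccBump_c0 (a b c d e f g h i j : Int) :
    ccBump (ccDict a b c d e f g h i j) "corrected" "INS" = ccDict a b c d e (f+1) g h i j := by
  simp [ccBump, ccDict, PySem.Dict.modify, PySem.Dict.getD, PySem.Dict.get?, PySem.Dict.insert, PySem.Dict.contains]

theorem ccBump_c1 (a b c d e f g h i j : Int) :
    ccBump (ccDict a b c d e f g h i j) "corrected" "OMI" = ccDict a b c d e f (g+1) h i j := by
  simp [ccBump, ccDict, PySem.Dict.modify, PySem.Dict.getD, PySem.Dict.get?, PySem.Dict.insert, PySem.Dict.contains]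

theorem ccBump_c2 (a b c d e f g h i j : Int) :
    ccBump (ccDict a b c d e f g h i j) "corrected" "SUB" = ccDict a b c d e f g (h+1) i j := by
  simp [ccBump, ccDict, PySem.Dict.modify, PySem.Dict.getD, PySem.Dict.get?, PySem.Dict.insert, PySem.Dict.contains]

theorem ccBump_c3 (a b c d e f g h i j : Int) :
    ccBump (ccDict a b c d e f g h i j) "corrected" "CAP" = ccDict a b c d e f g h (i+1) j := by
  simp [ccBump, ccDict, PySem.Dict.modify, PySem.Dict.getD, PySem.Dict.get?, PySem.Dict.insert, PySem.Dict.contains]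

theorem ccBump_c4 (a b c d e f g h i j : Int) :
    ccBump (ccDict a b c d e f g h i j) "corrected" "TRA" = ccDict a b c d e f g h i (j+1) := by
  simp [ccBump, ccDict, PySem.Dict.modify, PySem.Dict.getD, PySem.Dict.get?, PySem.Dict.insert, PySem.Dict.contains]

set_option maxHeartbeats 3200000 in
theorem ccLoop_inv (errs : List (Int × String)) (INF IF C F a b c d e f g h i j : Int) :
    count_component_loop errs INF IF C F (ccDict a b c d e f g h i j) =
      (INF + ccTally errs true "i" + ccTally errs true "o" + ccTally errs true "s"
           + ccTally errs true "c" + ccTally errs true "t",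
       IF + ccTally errs false "i" + ccTally errs false "o" + ccTally errs false "s"
          + ccTally errs false "c" + ccTally errs false "t",
       C + ccUnk errs, F,
       [("uncorrected",
         [("INS", a + ccTally errs true "i"), ("OMI", b + ccTally errs true "o"),
          ("SUB", c + ccTally errs true "s"), ("CAP", d + ccTally errs true "c"),
          ("TRA", e + ccTally errs true "t")]),
        ("corrected",
         [("INS", f + ccTally errs false "i"), ("OMI", g + ccTally errs false "o"),
          ("SUB", h + ccTally errs false "s"), ("CAP", i + ccTally errs false "c"),
          ("TRA", j + ccTally errs false "t")])]) := by
  induction errs generalizing INF IF C F a b c d e f g h i j with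
  | nil => simp [count_component_loop, ccDict, ccTally, ccUnk]
  | cons err rest ih =>
      obtain ⟨n, s⟩ := err
      by_cases hn : n = 0 <;>
        by_cases hi : s = "i" <;> by_cases ho : s = "o" <;> by_cases hs : s = "s" <;>
        by_cases hc : s = "c" <;> by_cases ht : s = "t" <;>
      simp_all [count_component_loop, ccBump_u0, ccBump_u1, ccBump_u2, ccBump_u3, ccBump_u4,
        ccBump_c0, ccBump_c1, ccBump_c2, ccBump_c3, ccBump_c4, ih, ccTally, ccUnk,
        List.countP_cons] <;> omega

-- ===== VERDICT (by name: the statement is the Claim_ definition above) =====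
theorem count_component_spec : Claim_equal_count_component := by
  intro l _
  show count_component l = count_component_alt l
  have hinit : (PySem.Dict.ofList
      [("uncorrected", PySem.Dict.ofList [("INS", (0:Int)), ("OMI", 0), ("SUB", 0), ("CAP", 0), ("TRA", 0)]),
       ("corrected", PySem.Dict.ofList [("INS", 0), ("OMI", 0), ("SUB", 0), ("CAP", 0), ("TRA", 0)])]) =
      ccDict 0 0 0 0 0 0 0 0 0 0 := by decide
  rw [count_component, hinit, ccLoop_inv]
  simp [count_component_alt, ccKinds, ccUnk]
  exact ⟨by ring, by ring⟩
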